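-- pv_equiv track=rewrite | github.com/Jinmo/ctfs | 2024/seccon-quals/rev/qrackv/emu.py | pbox
-- ===== SOURCE A (Python) =====
-- def pbox(x14, x15):
--     result = x15
--
--     for i in range(0x10):  # Loop L3
--         selector = (x14 >> (i * 4)) & 0x7
--         transformed = 0
--
--         for j in range(0x8):  # Loop L4
--             element = j
--             if j == 0:
--                 element = selector
--             if j == selector:
--                 element = 0
--
--             byte = (result >> (element * 8)) & 0xFF
--             transformed |= (byte << (j * 8))
--
--         result = transformed
--
--     return result
-- ===== SOURCE B (Python) =====
-- def pbox(x14, x15):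
--     b = [(x15 >> (8 * k)) & 0xFF for k in range(8)]
--     for i in range(16):
--         s = (x14 >> (4 * i)) & 0x7
--         b[0], b[s] = b[s], b[0]
--     return sum(byte << (8 * k) for k, byte in enumerate(b))
-- ===== Notes on version B (the rewrite author's own statement) =====
-- stated objective: simpler
-- what changed: B replaces the nested 16x8 byte-reassembly loops by an explicit 8-byte array: each outer step is a single swap of byte 0 with byte selector, and the bytes are folded back once at the end.
import Mathlib
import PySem

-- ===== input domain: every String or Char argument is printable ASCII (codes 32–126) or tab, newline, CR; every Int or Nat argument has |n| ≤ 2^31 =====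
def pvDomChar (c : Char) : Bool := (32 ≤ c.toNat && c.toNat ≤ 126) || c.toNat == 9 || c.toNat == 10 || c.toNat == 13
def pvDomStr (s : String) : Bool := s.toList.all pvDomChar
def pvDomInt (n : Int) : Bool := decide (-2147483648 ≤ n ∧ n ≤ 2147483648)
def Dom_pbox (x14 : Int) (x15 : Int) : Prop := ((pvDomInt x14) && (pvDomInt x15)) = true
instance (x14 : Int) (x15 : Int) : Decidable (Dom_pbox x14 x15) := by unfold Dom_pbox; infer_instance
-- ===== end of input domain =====

-- B keeps the state as an explicit list of 8 bytes and does one swap per outer step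
-- instead of A's inner 8-iteration reconstruction loop; objective: simpler.

-- ===== PORT A =====
-- literal port of A; 'element.toNat' is exact: element is 'x & 7' or a loop index, always ≥ 0
def pbox (x14 : Int) (x15 : Int) : Int :=
  (List.range 16).foldl (fun (result : Int) (i : Nat) =>
    let selector := PySem.Int.band (x14 >>> (i * 4)) 0x7
    (List.range 8).foldl (fun (transformed : Int) (j : Nat) =>
      let element : Int := (j : Int)
      let element := if (j : Int) = 0 then selector else element
      let element := if (j : Int) = selector then 0 else element
      let byte := PySem.Int.band (result >>> (element.toNat * 8)) 0xFF
      PySem.Int.bor transformed (byte <<< (j * 8))) 0) x15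

-- ===== PORT B =====
-- literal port of Source B; 's.toNat' is exact: s is 'x & 7', always ≥ 0
def pbox_alt (x14 : Int) (x15 : Int) : Int :=
  let b0 := (List.range 8).map (fun (k : Nat) => PySem.Int.band (x15 >>> (8 * k)) 0xFF)
  let b := (List.range 16).foldl (fun (b : List Int) (i : Nat) =>
    let s := (PySem.Int.band (x14 >>> (4 * i)) 0x7).toNat
    let t0 := b.getD s 0
    let ts := b.getD 0 0
    (b.set 0 t0).set s ts) b0
  b.zipIdx.foldl (fun (acc : Int) (p : Int × Nat) => acc + p.1 <<< (8 * p.2)) 0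

-- ===== PRECONDITION & SPEC =====
def Spec_pbox (x14 : Int) (x15 : Int) (out : Int) : Prop := out = pbox_alt x14 x15
instance (x14 : Int) (x15 : Int) (out : Int) : Decidable (Spec_pbox x14 x15 out) := by unfold Spec_pbox; infer_instance

-- ===== CLAIM (what is proved, stated in full; the proofs are below) =====
def Claim_equal_pbox : Prop := ∀ (x14 : Int) (x15 : Int), Dom_pbox x14 x15 → Spec_pbox x14 x15 (pbox x14 x15)

-- ===== LEMMAS AND PROOFS =====

-- byte k of r (Python (r >> 8k) & 0xFF)
def byteAt (r : Int) (k : Nat) : Int := PySem.Int.band (r >>> (k * 8)) 255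

def encR : List Int → Int
  | [] => 0
  | a :: t => a + 256 * encR t

def BytesOf (r : Int) : List Int :=
  [byteAt r 0, byteAt r 1, byteAt r 2, byteAt r 3, byteAt r 4, byteAt r 5, byteAt r 6, byteAt r 7]

def swap0 (s : Nat) (b : List Int) : List Int := (b.set 0 (b.getD s 0)).set s (b.getD 0 0)

def stepA (r s : Int) : Int :=
  (List.range 8).foldl (fun (transformed : Int) (j : Nat) =>
      let element : Int := (j : Int)
      let element := if (j : Int) = 0 then s else element
      let element := if (j : Int) = s then 0 else element
      let byte := PySem.Int.band (r >>> (element.toNat * 8)) 0xFF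
      PySem.Int.bor transformed (byte <<< (j * 8))) 0

lemma pbox_eq (x14 x15 : Int) :
    pbox x14 x15 = (List.range 16).foldl
      (fun (r : Int) (i : Nat) => stepA r (PySem.Int.band (x14 >>> (i * 4)) 7)) x15 := by
  unfold pbox
  congr 1

lemma pbox_alt_eq (x14 x15 : Int) :
    pbox_alt x14 x15 = ((List.range 16).foldl
      (fun (b : List Int) (i : Nat) => swap0 ((PySem.Int.band (x14 >>> (4 * i)) 7).toNat) b) (BytesOf x15)).zipIdx.foldl
        (fun (acc : Int) (p : Int × Nat) => acc + p.1 <<< (8 * p.2)) 0 := by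
  have h1 : (fun (b : List Int) (i : Nat) =>
      let s := (PySem.Int.band (x14 >>> (4 * i)) 0x7).toNat
      let t0 := b.getD s 0
      let ts := b.getD 0 0
      (b.set 0 t0).set s ts) = fun (b : List Int) (i : Nat) => swap0 ((PySem.Int.band (x14 >>> (4 * i)) 7).toNat) b := by
    funext b i; simp only [swap0]
  have h2 : (List.range 8).map (fun (k : Nat) => PySem.Int.band (x15 >>> (8 * k)) 0xFF) = BytesOf x15 := by
    norm_num [List.range, List.range.loop, List.map, BytesOf, byteAt, Int.shiftRight_zero]
  unfold pbox_alt
  rw [h1, h2]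

lemma band255 (a : Int) : PySem.Int.band a 255 = a % 256 := by
  unfold PySem.Int.band
  split_ifs with h1 h2 h2 <;> try norm_num at *
  · have := Nat.and_two_pow_sub_one_eq_mod a.toNat 8
    norm_num at this
    rw [show ((255:Int).toNat) = 255 from rfl, this]
    omega
  · rw [show ((255:Int).toNat) = 255 from rfl, Nat.and_comm]
    have := Nat.and_two_pow_sub_one_eq_mod (-a-1).toNat 8
    norm_num at this
    rw [this]
    omega

lemma band7 (a : Int) : PySem.Int.band a 7 = a % 8 := by
  unfold PySem.Int.band
  split_ifs with h1 h2 h2 <;> try norm_num at *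
  · have := Nat.and_two_pow_sub_one_eq_mod a.toNat 3
    norm_num at this
    rw [show ((7:Int).toNat) = 7 from rfl, this]
    omega
  · rw [show ((7:Int).toNat) = 7 from rfl, Nat.and_comm]
    have := Nat.and_two_pow_sub_one_eq_mod (-a-1).toNat 3
    norm_num at this
    rw [this]
    omega

lemma byteAt_nonneg (r : Int) (k : Nat) : 0 ≤ byteAt r k := by
  unfold byteAt; rw [band255]; exact Int.emod_nonneg _ (by norm_num)

lemma byteAt_lt (r : Int) (k : Nat) : byteAt r k < 256 := by
  unfold byteAt; rw [band255]; exact Int.emod_lt_of_pos _ (by norm_num)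

lemma lor_shift_nat (a b k : Nat) (h : a < 2 ^ k) : a ||| b * 2 ^ k = a + b * 2 ^ k := by
  have h1 : (a ||| b * 2 ^ k) % 2 ^ k = a := by
    rw [Nat.or_mod_two_pow, Nat.mul_mod_left, Nat.or_zero, Nat.mod_eq_of_lt h]
  have h2 : (a ||| b * 2 ^ k) / 2 ^ k = b := by
    rw [← Nat.shiftRight_eq_div_pow, Nat.shiftRight_or_distrib, Nat.shiftRight_eq_div_pow,
      Nat.shiftRight_eq_div_pow, Nat.div_eq_of_lt h, Nat.mul_div_cancel _ (Nat.two_pow_pos k),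
      Nat.zero_or]
  calc a ||| b * 2 ^ k = 2 ^ k * ((a ||| b * 2 ^ k) / 2 ^ k) + (a ||| b * 2 ^ k) % 2 ^ k :=
        (Nat.div_add_mod _ _).symm
    _ = a + b * 2 ^ k := by rw [h1, h2]; ring

lemma bor_add_int (x y : Int) (k : Nat) (hx0 : 0 ≤ x) (hx : x < 2 ^ k) (hy : 0 ≤ y) :
    PySem.Int.bor x (y <<< k) = x + y <<< k := by
  rw [Int.shiftLeft_eq]
  obtain ⟨n, rfl⟩ := Int.eq_ofNat_of_zero_le hx0
  obtain ⟨m, rfl⟩ := Int.eq_ofNat_of_zero_le hy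
  have h1 : ((m : Int)) * 2 ^ k = ((m * 2 ^ k : Nat) : Int) := by push_cast; ring
  rw [h1, PySem.Int.bor_natCast]
  have h2 : n < 2 ^ k := by exact_mod_cast hx
  rw [lor_shift_nat _ _ _ h2]
  push_cast; ring

lemma bor_chain (g : Nat → Int) (hg : ∀ j, 0 ≤ g j ∧ g j < 256) : ∀ n : Nat,
    ((List.range n).foldl (fun t j => PySem.Int.bor t (g j <<< (j * 8))) 0
      = (List.range n).foldl (fun t j => t + g j <<< (j * 8)) 0)
    ∧ 0 ≤ (List.range n).foldl (fun t j => t + g j <<< (j * 8)) 0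
    ∧ (List.range n).foldl (fun t j => t + g j <<< (j * 8)) 0 < 2 ^ (n * 8) := by
  intro n; induction n with
  | zero => simp
  | succ n ih =>
    obtain ⟨h1, h2, h3⟩ := ih
    rw [List.range_succ, List.foldl_append, List.foldl_append, List.foldl_cons, List.foldl_nil,
      List.foldl_cons, List.foldl_nil, h1]
    have hpow : (2 : Int) ^ ((n + 1) * 8) = 256 * 2 ^ (n * 8) := by
      rw [show (n + 1) * 8 = n * 8 + 8 from by ring, pow_add]; ring
    have hg1 := (hg n).1
    have hg2 := (hg n).2
    have hmul : g n * 2 ^ (n * 8) ≤ 255 * 2 ^ (n * 8) :=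
      mul_le_mul_of_nonneg_right (by omega) (by positivity)
    refine ⟨bor_add_int _ _ _ h2 (lt_of_lt_of_le h3 (by nlinarith [hpow, pow_pos (show (0:Int) < 2 from by norm_num) (n*8)])) hg1, ?_, ?_⟩
    · rw [Int.shiftLeft_eq]; have := mul_nonneg hg1 (pow_nonneg (show (0:Int) ≤ 2 from by norm_num) (n*8)); linarith
    · rw [Int.shiftLeft_eq, hpow]; linarith

lemma sr8_add (a T : Int) (h0 : 0 ≤ a) (h : a < 256) : (a + 256 * T) >>> (8 : Nat) = T := by
  rw [Int.shiftRight_eq_div_pow]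
  norm_num
  rw [Int.add_mul_ediv_left _ _ (by norm_num : (256:Int) ≠ 0), Int.ediv_eq_zero_of_lt h0 h]
  ring

lemma byteAt_zero_add (a T : Int) (h0 : 0 ≤ a) (h : a < 256) : byteAt (a + 256 * T) 0 = a := by
  unfold byteAt
  rw [show (0 * 8 : Nat) = 0 from rfl, Int.shiftRight_zero, band255]
  omega

lemma byteAt_succ_add (a T : Int) (k : Nat) (h0 : 0 ≤ a) (h : a < 256) :
    byteAt (a + 256 * T) (k + 1) = byteAt T k := by
  unfold byteAt
  have hsplit : (a + 256 * T) >>> ((k + 1) * 8) = ((a + 256 * T) >>> (8:Nat)) >>> (k * 8) := by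
    rw [Int.shiftRight_eq_div_pow, Int.shiftRight_eq_div_pow, Int.shiftRight_eq_div_pow]
    rw [Int.ediv_ediv_of_nonneg (by positivity)]
    congr 1
    push_cast
    rw [show (k + 1) * 8 = 8 + k * 8 from by ring, pow_add]
    norm_num
  rw [hsplit, sr8_add _ _ h0 h]

lemma encR_bytes (L : List Int) (hL : ∀ a ∈ L, 0 ≤ a ∧ a < 256) :
    ∀ k < L.length, byteAt (encR L) k = L.getD k 0 := by
  induction L with
  | nil => intro k hk; simp at hk
  | cons a t ih =>
    intro k hk
    have ha := hL a (by simp)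
    match k with
    | 0 => simpa [encR] using byteAt_zero_add a (encR t) ha.1 ha.2
    | k + 1 =>
      have := byteAt_succ_add a (encR t) k ha.1 ha.2
      simp only [encR]
      rw [this]
      exact ih (fun x hx => hL x (by simp [hx])) k (by simpa using hk)

lemma stepA_sum (r s : Int) :
    stepA r s = (List.range 8).foldl
      (fun (t : Int) (j : Nat) => t + (PySem.Int.band
        (r >>> (((if (j : Int) = s then 0 else if (j : Int) = 0 then s else (j : Int)).toNat) * 8))
        255) <<< (j * 8)) 0 :=
  (bor_chain (fun j => PySem.Int.band
      (r >>> (((if (j : Int) = s then 0 else if (j : Int) = 0 then s else (j : Int)).toNat) * 8)) 255)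
    (fun _j => ⟨byteAt_nonneg r _, byteAt_lt r _⟩) 8).1

lemma stepA_eq (r s : Int) (h0 : 0 ≤ s) (h8 : s < 8) :
    stepA r s = encR (swap0 s.toNat (BytesOf r)) := by
  rw [stepA_sum]
  interval_cases s <;>
    norm_num [List.range, List.range.loop, List.foldl, swap0, BytesOf, encR, List.set,
      List.getD, List.getElem?_cons, byteAt, Int.shiftLeft_eq,
      (show ((2:Int).toNat) = 2 from rfl), (show ((3:Int).toNat) = 3 from rfl),
      (show ((4:Int).toNat) = 4 from rfl), (show ((5:Int).toNat) = 5 from rfl),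
      (show ((6:Int).toNat) = 6 from rfl), (show ((7:Int).toNat) = 7 from rfl)] <;> ring

def GoodL (b : List Int) : Prop := b.length = 8 ∧ ∀ a ∈ b, 0 ≤ a ∧ a < 256

lemma good_BytesOf (r : Int) : GoodL (BytesOf r) := by
  refine ⟨rfl, ?_⟩
  intro a ha
  simp only [BytesOf, List.mem_cons, List.not_mem_nil, or_false] at ha
  rcases ha with rfl | rfl | rfl | rfl | rfl | rfl | rfl | rfl <;>
    exact ⟨byteAt_nonneg _ _, byteAt_lt _ _⟩

lemma getD_bound (b : List Int) (h : GoodL b) (k : Nat) :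
    0 ≤ b.getD k 0 ∧ b.getD k 0 < 256 := by
  by_cases hk : k < b.length
  · rw [List.getD_eq_getElem b 0 hk]
    exact h.2 _ (List.getElem_mem hk)
  · rw [List.getD_eq_default b 0 (by omega)]
    norm_num

lemma good_swap0 (s : Nat) (b : List Int) (h : GoodL b) : GoodL (swap0 s b) := by
  refine ⟨by simp [swap0, h.1], ?_⟩
  intro a ha
  unfold swap0 at ha
  rcases List.mem_or_eq_of_mem_set ha with ha2 | rfl
  · rcases List.mem_or_eq_of_mem_set ha2 with ha3 | rfl
    · exact h.2 _ ha3
    · exact getD_bound b h s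
  · exact getD_bound b h 0

lemma bytesOf_getElem (r : Int) (i : Nat) (hi : i < 8) : (BytesOf r)[i]'(by simp [BytesOf]; omega) = byteAt r i := by
  interval_cases i <;> rfl

lemma BytesOf_encR (L : List Int) (h : GoodL L) : BytesOf (encR L) = L := by
  apply List.ext_getElem (by simp [BytesOf, h.1])
  intro i h1 h2
  have h8 : i < 8 := by simpa [BytesOf] using h1
  rw [bytesOf_getElem _ _ h8, encR_bytes L h.2 i (by omega), List.getD_eq_getElem L 0 h2]

lemma bytes_stepA (r s : Int) (h0 : 0 ≤ s) (h8 : s < 8) :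
    BytesOf (stepA r s) = swap0 s.toNat (BytesOf r) := by
  rw [stepA_eq _ _ h0 h8, BytesOf_encR _ (good_swap0 _ _ (good_BytesOf r))]

lemma sel_bounds (x : Int) : 0 ≤ PySem.Int.band x 7 ∧ PySem.Int.band x 7 < 8 := by
  rw [band7]
  exact ⟨Int.emod_nonneg _ (by norm_num), Int.emod_lt_of_pos _ (by norm_num)⟩

lemma encFold_BytesOf (t : Int) :
    (BytesOf t).zipIdx.foldl (fun (acc : Int) (p : Int × Nat) => acc + p.1 <<< (8 * p.2)) 0
      = encR (BytesOf t) := by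
  simp [BytesOf, List.zipIdx, encR, Int.shiftLeft_eq]
  ring

theorem pbox_main (x14 x15 : Int) : pbox x14 x15 = pbox_alt x14 x15 := by
  rw [pbox_alt_eq, pbox_eq]
  have hfun : (fun (b : List Int) (i : Nat) => swap0 ((PySem.Int.band (x14 >>> (4 * i)) 7).toNat) b)
      = fun (b : List Int) (i : Nat) => swap0 ((PySem.Int.band (x14 >>> (i * 4)) 7).toNat) b := by
    funext b i; rw [Nat.mul_comm]
  rw [hfun]
  have hAB : ∀ (L : List Nat) (r : Int),
      L.foldl (fun (b : List Int) (i : Nat) => swap0 ((PySem.Int.band (x14 >>> (i * 4)) 7).toNat) b) (BytesOf r)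
        = BytesOf (L.foldl (fun (r' : Int) (i : Nat) => stepA r' (PySem.Int.band (x14 >>> (i * 4)) 7)) r) := by
    intro L
    induction L with
    | nil => intro r; rfl
    | cons i L ih =>
      intro r
      simp only [List.foldl_cons]
      rw [← bytes_stepA r _ (sel_bounds _).1 (sel_bounds _).2]
      exact ih _
  rw [hAB, encFold_BytesOf]
  rw [show (16 : Nat) = 15 + 1 from rfl, List.range_succ, List.foldl_append, List.foldl_cons,
    List.foldl_nil]
  rw [bytes_stepA _ _ (sel_bounds _).1 (sel_bounds _).2,
    ← stepA_eq _ _ (sel_bounds _).1 (sel_bounds _).2]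

-- ===== VERDICT (by name: the statement is the Claim_ definition above) =====
theorem pbox_spec : Claim_equal_pbox := by
  intro x14 x15 _
  exact pbox_main x14 x15
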